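-- pv_equiv track=rewrite | github.com/lasttillend/CS61A | mentor/CSM4.py | belgian_waffle
-- ===== SOURCE A (Python) =====
-- def belgian_waffle(n):
-- 	i = 0
-- 	total = 0
-- 	while i < n:
-- 		for j in range(n ** 2):
-- 			total += 1
-- 		i += 1
-- 	return total
-- ===== SOURCE B (Python) =====
-- def belgian_waffle(n):
--     return n ** 3 if n > 0 else 0
-- ===== Notes on version B (the rewrite author's own statement) =====
-- stated objective: faster
-- what changed: Replaced the nested counting loops (n iterations of n**2 unit increments) with the closed form n**3 for n > 0 and 0 otherwise.
import Mathlib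
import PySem

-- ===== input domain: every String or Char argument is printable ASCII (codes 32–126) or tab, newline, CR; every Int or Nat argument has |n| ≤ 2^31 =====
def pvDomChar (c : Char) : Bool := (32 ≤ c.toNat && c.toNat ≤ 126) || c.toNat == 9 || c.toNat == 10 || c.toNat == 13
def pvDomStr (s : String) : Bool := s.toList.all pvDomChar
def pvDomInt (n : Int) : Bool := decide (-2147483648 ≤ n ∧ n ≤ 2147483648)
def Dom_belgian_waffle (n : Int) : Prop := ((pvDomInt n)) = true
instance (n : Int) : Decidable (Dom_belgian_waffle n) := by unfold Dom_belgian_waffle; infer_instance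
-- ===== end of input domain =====

-- B replaces A's nested counting loops with the closed form n^3 (0 for n ≤ 0); asymptotically faster.
-- ===== PORT A =====
-- inner 'for j in range(n ** 2): total += 1'
def bwInner (n2 : Int) (total : Int) : Int :=
  (PySem.List.pyRange 0 n2 1).foldl (fun t _ => t + 1) total

-- 'while i < n: … ; i += 1' as fuel recursion (fuel = number of remaining iterations)
def bwLoop (n : Int) (fuel : Nat) (i total : Int) : Int :=
  match fuel with
  | 0 => total
  | f + 1 => if i < n then bwLoop n f (i + 1) (bwInner (n ^ 2) total) else total

def belgian_waffle (n : Int) : Int := bwLoop n n.toNat 0 0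

-- ===== PORT B =====
def belgian_waffle_alt (n : Int) : Int := if n > 0 then n ^ 3 else 0

-- ===== PRECONDITION & SPEC =====
def Spec_belgian_waffle (n : Int) (out : Int) : Prop := out = belgian_waffle_alt n
instance (n : Int) (out : Int) : Decidable (Spec_belgian_waffle n out) := by unfold Spec_belgian_waffle; infer_instance

-- ===== CLAIM (what is proved, stated in full; the proofs are below) =====
def Claim_equal_belgian_waffle : Prop := ∀ (n : Int), Dom_belgian_waffle n → Spec_belgian_waffle n (belgian_waffle n)

-- ===== LEMMAS AND PROOFS =====

-- ===== VERDICT (by name: the statement is the Claim_ definition above) =====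
-- foldl of (+1) adds the list's length
theorem bwInner_eq (n2 total : Int) : bwInner n2 total = total + (n2.toNat : Int) := by
  unfold bwInner
  have h : ∀ (l : List Int) (t : Int), l.foldl (fun t _ => t + 1) t = t + l.length := by
    intro l
    induction l with
    | nil => intro t; simp
    | cons a l ih => intro t; simp [List.foldl, ih]; ring
  rw [h, PySem.List.length_pyRange_one]
  norm_num

theorem bwLoop_eq (n : Int) (fuel : Nat) (i total : Int)
    (h : i + fuel = n) : bwLoop n fuel i total = total + fuel * n ^ 2 := by
  induction fuel generalizing i total with
  | zero => simp [bwLoop]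
  | succ f ih =>
      have hi : i < n := by omega
      rw [bwLoop, if_pos hi, ih (i + 1) _ (by omega), bwInner_eq]
      have : ((n ^ 2).toNat : Int) = n ^ 2 := by
        have : 0 ≤ n ^ 2 := sq_nonneg n
        omega
      rw [this]
      push_cast
      ring

theorem belgian_waffle_spec : Claim_equal_belgian_waffle := by
  intro n _
  show belgian_waffle n = belgian_waffle_alt n
  unfold belgian_waffle belgian_waffle_alt
  rcases lt_or_ge 0 n with h | h
  · rw [bwLoop_eq n n.toNat 0 0 (by omega), if_pos h]
    have hn : (n.toNat : Int) = n := by omega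
    rw [hn]; ring
  · have h0 : n.toNat = 0 := by omega
    have h1 : ¬ n > 0 := by omega
    simp [h0, bwLoop, h1]
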